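-- pv_equiv track=rewrite | github.com/smiles724/Proteo-R1 | proteor1/generate/inference/cdr_hidden_emit.py | _masked_segments
-- ===== SOURCE A (Python) =====
-- def _masked_segments(sequence: str, mask: str) -> list[tuple[int, int, str]]:
--     segments: list[tuple[int, int, str]] = []
--     start: int | None = None
--     for idx, flag in enumerate(mask):
--         if flag == "1" and start is None:
--             start = idx
--         elif flag != "1" and start is not None:
--             segments.append((start, idx, sequence[start:idx]))
--             start = None
--     if start is not None:
--         segments.append((start, len(mask), sequence[start:]))
--     return segments
-- ===== SOURCE B (Python) =====
-- def _masked_segments(sequence: str, mask: str) -> list[tuple[int, int, str]]: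
--     # Edge detection: compare mask with shifted copies of itself to find the
--     # rising and falling edges of the '1'-runs, then pair them up.
--     flags = [c == "1" for c in mask]
--     rises = [i for i, (prev, cur) in enumerate(zip([False] + flags, flags)) if cur and not prev]
--     falls = [i + 1 for i, (cur, nxt) in enumerate(zip(flags, flags[1:] + [False])) if cur and not nxt]
--     return [(s, e, sequence[s:e]) for s, e in zip(rises, falls)]
-- ===== Notes on version B (the rewrite author's own statement) =====
-- stated objective: alternative
-- what changed: Replaced A's sequential start/None state machine with edge detection: zip the mask flags with shifted copies of themselves to list all rising and falling edges, then pair them up and slice; Pre_ excludes inputs where mask ends in '1' and sequence is longer than mask, on which A's trailing flush slices sequence[start:] past the mask, an artefact of its implementation.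
-- outside the precondition, e.g. on _masked_segments('ABCDE', '11'): A returns [(0, 2, 'ABCDE')], B returns [(0, 2, 'AB')]
import Mathlib
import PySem

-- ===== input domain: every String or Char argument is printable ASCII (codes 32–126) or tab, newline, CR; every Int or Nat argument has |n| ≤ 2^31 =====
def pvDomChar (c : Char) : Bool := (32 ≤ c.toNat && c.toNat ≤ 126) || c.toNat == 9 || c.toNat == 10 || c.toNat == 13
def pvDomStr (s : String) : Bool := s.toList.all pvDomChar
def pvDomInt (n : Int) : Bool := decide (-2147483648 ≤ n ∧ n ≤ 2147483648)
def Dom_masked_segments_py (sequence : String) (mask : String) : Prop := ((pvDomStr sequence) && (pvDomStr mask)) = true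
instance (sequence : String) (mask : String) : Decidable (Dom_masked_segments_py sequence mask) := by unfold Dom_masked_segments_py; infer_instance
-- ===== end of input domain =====

-- B finds the segments by edge detection (zips of the mask's flags with shifted copies)
-- instead of A's sequential start/None state machine; alternative algorithm, same O(n) cost.

-- ===== PORT A =====
-- A's for-loop over enumerate(mask) with state (start : Option Nat), literal branch order.
def goA (seq : List Char) (mlen : Nat) (ms : List Char) (idx : Nat)
    (start : Option Nat) (acc : List (Int × Int × String)) : List (Int × Int × String) :=
  match ms with
  | [] =>
    match start with
    | none => acc
    | some s => acc ++ [((s : Int), (mlen : Int),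
        String.ofList (PySem.List.slice seq (some (s : Int)) none))]
  | c :: rest =>
    match start with
    | none =>
      if c = '1' then goA seq mlen rest (idx + 1) (some idx) acc
      else goA seq mlen rest (idx + 1) none acc
    | some s =>
      if c = '1' then goA seq mlen rest (idx + 1) (some s) acc
      else goA seq mlen rest (idx + 1) none
        (acc ++ [((s : Int), (idx : Int),
          String.ofList (PySem.List.slice seq (some (s : Int)) (some (idx : Int))))])

def masked_segments_py (sequence : String) (mask : String) : List (Int × Int × String) :=
  goA sequence.toList mask.toList.length mask.toList 0 none []

-- ===== PORT B =====
-- flags = [c == "1" for c in mask]; rises/falls are the filter-comprehensions over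
-- enumerate(zip([False]+flags, flags)) resp. enumerate(zip(flags, flags[1:]+[False])).
def masked_segments_py_alt (sequence : String) (mask : String) : List (Int × Int × String) :=
  let seq := sequence.toList
  let flags := mask.toList.map (fun c => c == '1')
  let rises := (PySem.List.enumerate ((false :: flags).zip flags)).filterMap
      (fun p => if p.2.2 && !p.2.1 then some p.1 else none)
  let falls := (PySem.List.enumerate (flags.zip (PySem.List.slice flags (some 1) none ++ [false]))).filterMap
      (fun p => if p.2.1 && !p.2.2 then some (p.1 + 1) else none)
  (rises.zip falls).map
    (fun p => (p.1, p.2, String.ofList (PySem.List.slice seq (some p.1) (some p.2))))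

-- ===== PRECONDITION & SPEC =====
-- Pre_ excludes inputs where mask ends in '1' AND sequence is longer than mask: there A's
-- trailing flush appends sequence[start:], which runs past the mask — an artefact of A's
-- implementation; B slices sequence[start:end] like every other segment.
def Pre_masked_segments_py (sequence : String) (mask : String) : Prop :=
  mask.toList.getLast? = some '1' → sequence.toList.length ≤ mask.toList.length
instance (sequence : String) (mask : String) : Decidable (Pre_masked_segments_py sequence mask) := by unfold Pre_masked_segments_py; infer_instance

def pvWitness_masked_segments_py : String × String := ("AB", "01")

def Spec_masked_segments_py (sequence : String) (mask : String) (out : List (Int × Int × String)) : Prop := out = masked_segments_py_alt sequence mask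
instance (sequence : String) (mask : String) (out : List (Int × Int × String)) : Decidable (Spec_masked_segments_py sequence mask out) := by unfold Spec_masked_segments_py; infer_instance

-- ===== CLAIM (what is proved, stated in full; the proofs are below) =====
def Claim_equal_masked_segments_py : Prop := ∀ (sequence : String) (mask : String), Dom_masked_segments_py sequence mask → Pre_masked_segments_py sequence mask → Spec_masked_segments_py sequence mask (masked_segments_py sequence mask)

-- ===== LEMMAS AND PROOFS =====

-- number of leading '1' characters
def leadOnes : List Char → Nat
  | [] => 0
  | c :: rest => if c = '1' then leadOnes rest + 1 else 0

lemma leadOnes_cons_one (rest : List Char) : leadOnes ('1' :: rest) = leadOnes rest + 1 := by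
  simp [leadOnes]

-- run jumper with A's conditional trailing slice (middle form for the A side)
def goB (seq : List Char) (mlen : Nat) (ms : List Char) (i : Nat) :
    List (Int × Int × String) :=
  match h : ms with
  | [] => []
  | c :: rest =>
    if hc : c = '1' then
      let k := leadOnes (c :: rest)
      let j := i + k
      ((i : Int), (j : Int),
        String.ofList (if j = mlen then PySem.List.slice seq (some (i : Int)) none
         else PySem.List.slice seq (some (i : Int)) (some (j : Int))))
        :: goB seq mlen ((c :: rest).drop k) j
    else goB seq mlen rest (i + 1)
termination_by ms.length
decreasing_by
  · subst hc
    simp [leadOnes_cons_one]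
  · simp

-- run jumper with the plain slice (middle form for the B side)
def runScanC (seq : List Char) (ms : List Char) (i : Nat) :
    List (Int × Int × String) :=
  match h : ms with
  | [] => []
  | c :: rest =>
    if hc : c = '1' then
      let k := leadOnes (c :: rest)
      let j := i + k
      ((i : Int), (j : Int),
        String.ofList (PySem.List.slice seq (some (i : Int)) (some (j : Int))))
        :: runScanC seq ((c :: rest).drop k) j
    else runScanC seq rest (i + 1)
termination_by ms.length
decreasing_by
  · subst hc
    simp [leadOnes_cons_one]
  · simp

lemma leadOnes_le (l : List Char) : leadOnes l ≤ l.length := by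
  induction l with
  | nil => simp [leadOnes]
  | cons c rest ih => simp [leadOnes]; split <;> omega

-- what goA computes when a segment is open at s (characterised via leadOnes)
def rhsSome (seq : List Char) (mlen : Nat) (ms : List Char) (i s : Nat)
    (acc : List (Int × Int × String)) : List (Int × Int × String) :=
  let k := leadOnes ms
  if k = ms.length then
    acc ++ [((s : Int), (mlen : Int),
      String.ofList (PySem.List.slice seq (some (s : Int)) none))]
  else
    acc ++ ((s : Int), ((i + k : Nat) : Int),
      String.ofList (PySem.List.slice seq (some (s : Int)) (some ((i + k : Nat) : Int))))
      :: goB seq mlen (ms.drop k) (i + k)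

lemma goB_cons_one (seq : List Char) (mlen : Nat) (rest : List Char) (i : Nat) :
    goB seq mlen ('1' :: rest) i =
      ((i : Int), ((i + leadOnes ('1' :: rest) : Nat) : Int),
        String.ofList (if i + leadOnes ('1' :: rest) = mlen
          then PySem.List.slice seq (some (i : Int)) none
          else PySem.List.slice seq (some (i : Int))
                 (some ((i + leadOnes ('1' :: rest) : Nat) : Int))))
        :: goB seq mlen (('1' :: rest).drop (leadOnes ('1' :: rest)))
             (i + leadOnes ('1' :: rest)) := by
  rw [goB]
  simp

lemma goB_cons_ne (seq : List Char) (mlen : Nat) (c : Char) (rest : List Char) (i : Nat)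
    (hc : c ≠ '1') : goB seq mlen (c :: rest) i = goB seq mlen rest (i + 1) := by
  rw [goB]
  simp [hc]

lemma goA_eq (seq : List Char) (mlen : Nat) :
    ∀ (ms : List Char) (i : Nat), i + ms.length = mlen →
      ∀ (acc : List (Int × Int × String)),
        (goA seq mlen ms i none acc = acc ++ goB seq mlen ms i) ∧
        (∀ s, goA seq mlen ms i (some s) acc = rhsSome seq mlen ms i s acc) := by
  intro ms
  induction ms with
  | nil =>
    intro i hi acc
    constructor
    · simp [goA, goB]
    · intro s
      simp [goA, rhsSome, leadOnes]
  | cons c rest ih =>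
    intro i hi acc
    have hrest : (i + 1) + rest.length = mlen := by simp at hi; omega
    constructor
    · -- start = none
      by_cases hc : c = '1'
      · subst hc
        rw [goA]
        simp only
        rw [(ih (i + 1) hrest acc).2 i, rhsSome, goB_cons_one]
        simp only [leadOnes_cons_one]
        by_cases hk : leadOnes rest = rest.length
        · have hj' : i + (rest.length + 1) = mlen := by simp at hi; omega
          simp only [hk, if_true, List.drop_succ_cons, List.drop_length, hj', if_true]
          rw [goB.eq_def]
        · have hkl : leadOnes rest < rest.length := lt_of_le_of_ne (leadOnes_le rest) hk
          have h2 : ¬ (leadOnes rest + 1 = rest.length + 1) := by omega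
          have hlt : ¬ (i + (leadOnes rest + 1) = mlen) := by
            simp at hi; omega
          simp only [hk, hlt, if_false, if_true, List.drop_succ_cons]
          have harith : i + 1 + leadOnes rest = i + (leadOnes rest + 1) := by omega
          rw [harith]
      · rw [goA]
        simp only [hc, if_false]
        rw [(ih (i + 1) hrest acc).1, goB_cons_ne seq mlen c rest i hc]
    · -- start = some s
      intro s
      by_cases hc : c = '1'
      · subst hc
        rw [goA]
        simp only [if_true]
        rw [(ih (i + 1) hrest acc).2 s, rhsSome, rhsSome]
        simp only [leadOnes_cons_one, List.length_cons]
        by_cases hk : leadOnes rest = rest.length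
        · simp [hk]
        · have h2 : ¬ (leadOnes rest + 1 = rest.length + 1) := by omega
          simp only [hk, if_false, h2]
          have harith : i + 1 + leadOnes rest = i + (leadOnes rest + 1) := by omega
          rw [harith]
          simp [List.drop_succ_cons]
      · rw [goA]
        simp only [hc, if_false]
        rw [(ih (i + 1) hrest _).1, rhsSome]
        have h0 : leadOnes (c :: rest) = 0 := by simp [leadOnes, hc]
        simp only [h0, List.length_cons]
        have hne : ¬ (0 = rest.length + 1) := by omega
        simp only [hne, if_false, List.drop_zero, Nat.add_zero]
        rw [goB_cons_ne seq mlen c rest i hc]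
        simp

-- ---- goB = runScanC under the precondition ----

lemma allOnes_getLast (ms : List Char) (h : leadOnes ms = ms.length) (hne : ms ≠ []) :
    ms.getLast? = some '1' := by
  induction ms with
  | nil => simp at hne
  | cons c rest ih =>
    by_cases hc : c = '1'
    · subst hc
      rw [leadOnes_cons_one] at h
      cases rest with
      | nil => simp
      | cons d r2 =>
        rw [List.getLast?_cons_cons]
        exact ih (by simpa using h) (by simp)
    · simp [leadOnes, hc] at h

lemma getLast?_drop_of_lt {α : Type} (l : List α) (k : Nat) (hk : k < l.length) :
    (l.drop k).getLast? = l.getLast? := by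
  induction l generalizing k with
  | nil => simp at hk
  | cons c rest ih =>
    cases k with
    | zero => simp
    | succ k' =>
      simp only [List.drop_succ_cons]
      rw [ih k' (by simpa using hk)]
      cases rest with
      | nil => simp at hk
      | cons d r2 => rw [List.getLast?_cons_cons]

-- version used when the mask does NOT end in '1'
lemma goB_eq_runScanC' (seq : List Char) (mlen : Nat) :
    ∀ (n : Nat) (ms : List Char) (i : Nat), ms.length ≤ n → i + ms.length = mlen →
      (ms.getLast? = some '1' → seq.length ≤ mlen) →
      goB seq mlen ms i = runScanC seq ms i := by
  intro n
  induction n with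
  | zero =>
    intro ms i hle _ _
    have : ms = [] := by
      cases ms with
      | nil => rfl
      | cons c r => simp at hle
    subst this
    rw [goB, runScanC]
  | succ n ih =>
    intro ms i hle hmlen hlast
    cases ms with
    | nil => rw [goB, runScanC]
    | cons c rest =>
      by_cases hc : c = '1'
      · subst hc
        rw [goB_cons_one, runScanC]
        simp only [reduceDIte]
        congr 1
        · congr 2
          by_cases hj : i + leadOnes ('1' :: rest) = mlen
          · -- the run reaches the end of the mask, so the mask ends in '1'
            have hk : leadOnes ('1' :: rest) = ('1' :: rest).length := by
              have := leadOnes_le ('1' :: rest); omega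
            have hlast1 : ('1' :: rest).getLast? = some '1' :=
              allOnes_getLast _ hk (by simp)
            have hs : seq.length ≤ mlen := hlast hlast1
            have hlen2 : (seq.drop i).length ≤ mlen - i := by
              simp only [List.length_drop]
              omega
            simp only [hj, if_true]
            rw [PySem.List.slice_from_natCast, PySem.List.slice_natCast,
                List.take_of_length_le hlen2]
          · simp [hj]
        · -- recursive call: the dropped suffix keeps the last element
          have hkle := leadOnes_le ('1' :: rest)
          have hk1 := leadOnes_cons_one rest
          have h2 := leadOnes_le rest
          simp only [List.length_cons] at hkle hle hmlen
          refine ih _ _ (by simp only [List.length_drop, List.length_cons]; omega)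
            (by simp only [List.length_drop, List.length_cons]; omega) ?_
          intro hl
          by_cases hkf : leadOnes ('1' :: rest) < ('1' :: rest).length
          · rw [getLast?_drop_of_lt _ _ hkf] at hl
            exact hlast hl
          · have hk : leadOnes ('1' :: rest) = ('1' :: rest).length := by
              simp only [List.length_cons] at hkf ⊢
              omega
            exact hlast (allOnes_getLast _ hk (by simp))
      · rw [goB_cons_ne seq mlen c rest i hc, runScanC]
        simp only [hc, reduceDIte]
        refine ih rest (i + 1) (by simp at hle; omega) (by simp at hmlen; omega) ?_
        intro hl
        cases rest with
        | nil => simp at hl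
        | cons d r2 =>
          rw [← List.getLast?_cons_cons (a := c)] at hl
          exact hlast hl

-- ---- the B side: edge walks ----

def rWalk : Bool → List Bool → Nat → List Int
  | _, [], _ => []
  | prev, b :: rest, i =>
    if b && !prev then (i : Int) :: rWalk b rest (i + 1) else rWalk b rest (i + 1)

def fWalk : List Bool → Nat → List Int
  | [], _ => []
  | b :: rest, i =>
    if b && !(rest.headD false) then ((i : Int) + 1) :: fWalk rest (i + 1)
    else fWalk rest (i + 1)

def leadTrues : List Bool → Nat
  | [] => 0
  | b :: rest => if b then leadTrues rest + 1 else 0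

lemma rWalk_cons (prev b : Bool) (rest : List Bool) (i : Nat) :
    rWalk prev (b :: rest) i =
      if b && !prev then (i : Int) :: rWalk b rest (i + 1) else rWalk b rest (i + 1) := rfl

lemma fWalk_cons (b : Bool) (rest : List Bool) (i : Nat) :
    fWalk (b :: rest) i =
      if b && !(rest.headD false) then ((i : Int) + 1) :: fWalk rest (i + 1)
      else fWalk rest (i + 1) := rfl

lemma rises_eq_rWalk (fs : List Bool) :
    ∀ (prev : Bool) (i : Nat),
      ((PySem.List.enumerate ((prev :: fs).zip fs) (i : Int)).filterMap
        (fun p => if p.2.2 && !p.2.1 then some p.1 else none)) = rWalk prev fs i := by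
  induction fs with
  | nil => intro prev i; simp [PySem.List.enumerate_nil, rWalk]
  | cons b rest ih =>
    intro prev i
    rw [List.zip_cons_cons, PySem.List.enumerate_cons]
    simp only [List.filterMap_cons]
    have : ((i : Int) + 1) = ((i + 1 : Nat) : Int) := by push_cast; ring
    rw [this, ih b (i + 1), rWalk]
    by_cases hb : (b && !prev) = true
    · simp [hb]
    · simp [hb]

lemma falls_eq_fWalk (fs : List Bool) :
    ∀ (i : Nat),
      ((PySem.List.enumerate (fs.zip (fs.drop 1 ++ [false])) (i : Int)).filterMap
        (fun p => if p.2.1 && !p.2.2 then some (p.1 + 1) else none)) = fWalk fs i := by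
  induction fs with
  | nil => intro i; simp [PySem.List.enumerate_nil, fWalk]
  | cons b rest ih =>
    intro i
    have hstep : ((i : Int) + 1) = ((i + 1 : Nat) : Int) := by push_cast; ring
    cases rest with
    | nil =>
      cases b <;>
        simp [PySem.List.enumerate_cons, PySem.List.enumerate_nil, fWalk]
    | cons d r2 =>
      simp only [List.drop_one, List.tail_cons]
      rw [show (b :: d :: r2).zip ((d :: r2) ++ [false]) =
            (b, d) :: ((d :: r2).zip (r2 ++ [false])) by simp,
          PySem.List.enumerate_cons, List.filterMap_cons]
      have hr : ((PySem.List.enumerate ((d :: r2).zip ((d :: r2).drop 1 ++ [false])) ((i + 1 : Nat) : Int)).filterMap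
          (fun p => if p.2.1 && !p.2.2 then some (p.1 + 1) else none)) = fWalk (d :: r2) (i + 1) := ih (i + 1)
      simp only [List.drop_one, List.tail_cons] at hr
      rw [hstep, hr]
      rw [show fWalk (b :: d :: r2) i =
            if b && !((d :: r2).headD false) then ((i : Int) + 1) :: fWalk (d :: r2) (i + 1)
            else fWalk (d :: r2) (i + 1) from rfl]
      simp only [List.headD_cons]
      by_cases hb : (b && !d) = true
      · simp [hb]
      · simp [hb]

lemma leadTrues_cons_true (rest : List Bool) :
    leadTrues (true :: rest) = leadTrues rest + 1 := by simp [leadTrues]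

lemma leadTrues_head_false (fs : List Bool) (h : fs.headD false = false) :
    leadTrues fs = 0 := by
  cases fs with
  | nil => simp [leadTrues]
  | cons b rest => simp at h; simp [leadTrues, h]

lemma rWalk_skip (fs : List Bool) :
    ∀ (i : Nat), rWalk true fs i = rWalk false (fs.drop (leadTrues fs)) (i + leadTrues fs) := by
  induction fs with
  | nil => intro i; simp [leadTrues, rWalk]
  | cons b rest ih =>
    intro i
    cases b with
    | true =>
      rw [rWalk_cons, leadTrues_cons_true]
      simp only [Bool.and_not_self, List.drop_succ_cons]
      rw [ih (i + 1), show i + 1 + leadTrues rest = i + (leadTrues rest + 1) from by omega]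
      simp
    | false =>
      have h0 : leadTrues (false :: rest) = 0 := by simp [leadTrues]
      rw [h0]
      simp only [List.drop_zero, Nat.add_zero]
      rw [rWalk_cons, rWalk_cons]
      simp

lemma fWalk_skip (fs : List Bool) :
    ∀ (i : Nat), fs.headD false = true →
      fWalk fs i = ((i + leadTrues fs : Nat) : Int) :: fWalk (fs.drop (leadTrues fs)) (i + leadTrues fs) := by
  induction fs with
  | nil => intro i h; simp at h
  | cons b rest ih =>
    intro i h
    simp only [List.headD_cons] at h
    subst h
    rw [leadTrues_cons_true]
    simp only [List.drop_succ_cons]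
    by_cases hr : rest.headD false = true
    · rw [fWalk_cons]
      simp only [hr, Bool.and_not_self]
      rw [ih (i + 1) hr, show i + 1 + leadTrues rest = i + (leadTrues rest + 1) from by omega]
      simp
    · have hnx : (true && !(rest.headD false)) = true := by
        cases hrr : rest.headD false
        · simp
        · exact absurd hrr hr
      have h0 : leadTrues rest = 0 := leadTrues_head_false rest (by
        cases hrr : rest.headD false
        · rfl
        · exact absurd hrr hr)
      rw [h0]
      simp only [Nat.zero_add, List.drop_zero]
      rw [fWalk_cons, hnx]
      simp only [if_true]
      norm_cast

-- flags of a char list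
lemma leadTrues_flags (ms : List Char) :
    leadTrues (ms.map (fun c => c == '1')) = leadOnes ms := by
  induction ms with
  | nil => simp [leadTrues, leadOnes]
  | cons c rest ih =>
    by_cases hc : c = '1'
    · subst hc; simp [leadTrues, leadOnes, ih]
    · simp [leadTrues, leadOnes, hc]

lemma zip_walks_eq_runScanC (seq : List Char) :
    ∀ (n : Nat) (ms : List Char) (i : Nat), ms.length ≤ n →
      (((rWalk false (ms.map (fun c => c == '1')) i).zip
          (fWalk (ms.map (fun c => c == '1')) i)).map
        (fun p => (p.1, p.2, String.ofList (PySem.List.slice seq (some p.1) (some p.2))))) =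
      runScanC seq ms i := by
  intro n
  induction n with
  | zero =>
    intro ms i hle
    have : ms = [] := by
      cases ms with
      | nil => rfl
      | cons c r => simp at hle
    subst this
    rw [runScanC]
    simp [rWalk, fWalk]
  | succ n ih =>
    intro ms i hle
    cases ms with
    | nil => rw [runScanC]; simp [rWalk, fWalk]
    | cons c rest =>
      rw [runScanC]
      by_cases hc : c = '1'
      · subst hc
        simp only [reduceDIte]
        have hflags : (('1' :: rest).map (fun c => c == '1')) =
            true :: rest.map (fun c => c == '1') := by simp
        have hk : leadTrues (rest.map (fun c => c == '1')) = leadOnes rest :=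
          leadTrues_flags rest
        have hlen : (rest.drop (leadOnes rest)).length ≤ n := by
          simp only [List.length_drop]
          simp only [List.length_cons] at hle
          omega
        rw [hflags, rWalk_cons, fWalk_skip (true :: rest.map (fun c => c == '1')) i (by simp),
            leadTrues_cons_true, hk]
        simp only [Bool.not_false, Bool.and_true, if_true, List.drop_succ_cons]
        rw [rWalk_skip (rest.map (fun c => c == '1')) (i + 1), hk,
            show (rest.map (fun c => c == '1')).drop (leadOnes rest) =
              (rest.drop (leadOnes rest)).map (fun c => c == '1') from by
                rw [List.map_drop],
            show i + 1 + leadOnes rest = i + (leadOnes rest + 1) from by omega]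
        rw [List.zip_cons_cons, List.map_cons,
            ih (rest.drop (leadOnes rest)) (i + (leadOnes rest + 1)) hlen]
        rw [leadOnes_cons_one, List.drop_succ_cons]
      · simp only [hc, reduceDIte]
        have hflags : ((c :: rest).map (fun c => c == '1')) =
            false :: rest.map (fun c => c == '1') := by simp [hc]
        rw [hflags, rWalk_cons, fWalk_cons]
        simp only [Bool.false_and]
        exact ih rest (i + 1) (by simp only [List.length_cons] at hle; omega)

-- ===== VERDICT (by name: the statement is the Claim_ definition above) =====
theorem masked_segments_py_spec : Claim_equal_masked_segments_py := by
  intro sequence mask _ hpre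
  unfold Spec_masked_segments_py masked_segments_py masked_segments_py_alt
  rw [(goA_eq sequence.toList mask.toList.length mask.toList 0 (by simp) []).1]
  simp only [List.nil_append]
  rw [goB_eq_runScanC' sequence.toList mask.toList.length mask.toList.length mask.toList 0
      (le_refl _) (by simp) hpre]
  rw [PySem.List.slice_from_one, ← List.drop_one]
  have hr0 := rises_eq_rWalk (mask.toList.map (fun c => c == '1')) false 0
  have hf0 := falls_eq_fWalk (mask.toList.map (fun c => c == '1')) 0
  have hz0 := zip_walks_eq_runScanC sequence.toList mask.toList.length mask.toList 0 (le_refl _)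
  simp only [Nat.cast_zero] at hr0 hf0 hz0
  rw [hr0, hf0, hz0]
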